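-- pv_equiv track=rewrite | github.com/Skyscanner/turbolift | data_governance/scripts/cf_script.py | _json_array_end
-- ===== SOURCE A (Python) =====
-- def _json_array_end(lines, start_idx):
--     end, depth = start_idx + 1, 1
--     while end < len(lines):
--         depth += lines[end].count("[")
--         depth -= lines[end].count("]")
--         if depth == 0:
--             return end
--         end += 1
--     return None
-- ===== SOURCE B (Python) =====
-- def _json_array_end(lines, start_idx):
--     # Two phases: build the running-depth prefix sums for the suffix, then
--     # scan that sequence for the first zero.
--     start = start_idx + 1
--     depths = []
--     depth = 1
--     for line in lines[start:]:
--         depth += line.count("[") - line.count("]")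
--         depths.append(depth)
--     for i, d in enumerate(depths):
--         if d == 0:
--             return start + i
--     return None
-- ===== Notes on version B (the rewrite author's own statement) =====
-- stated objective: alternative
-- what changed: B replaces A's single fused index-driven while-loop by two separately shaped passes: it first slices the suffix and materialises the running bracket-depth prefix sums, then scans that sequence for the first zero, mapping the offset back to an absolute line index.
-- outside the precondition, e.g. on _json_array_end([']', 'x'], -2): A returns 0, B returns None
import Mathlib
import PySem

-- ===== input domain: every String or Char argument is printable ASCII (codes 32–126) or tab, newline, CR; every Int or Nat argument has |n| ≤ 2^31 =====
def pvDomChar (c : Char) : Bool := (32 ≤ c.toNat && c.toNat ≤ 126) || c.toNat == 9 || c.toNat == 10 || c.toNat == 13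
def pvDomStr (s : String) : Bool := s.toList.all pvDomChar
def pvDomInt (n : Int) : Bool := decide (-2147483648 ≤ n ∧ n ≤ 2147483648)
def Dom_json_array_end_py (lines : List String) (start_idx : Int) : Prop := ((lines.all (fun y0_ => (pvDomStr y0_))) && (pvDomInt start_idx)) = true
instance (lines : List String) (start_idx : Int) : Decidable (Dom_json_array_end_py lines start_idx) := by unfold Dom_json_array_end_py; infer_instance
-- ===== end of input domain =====

-- B splits A's fused while-loop into two passes (prefix-sum depths, then first-zero
-- scan); objective: alternative decomposition, same cost. Equal return values on Pre_.

-- ===== PORT A =====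
-- the while-loop of A: fuel counts the remaining iterations (lines.length suffices on Pre_)
def jaLoopA (lines : List String) : Nat → Int → Int → Option Int
  | 0, _, _ => none
  | fuel + 1, e, depth =>
    if e < (lines.length : Int) then
      match PySem.List.pyGet? lines e with
      | none => none
      | some line =>
        let d := depth + (PySem.Str.count line "[" : Int) - (PySem.Str.count line "]" : Int)
        if d = 0 then some e else jaLoopA lines fuel (e + 1) d
    else none

def json_array_end_py (lines : List String) (start_idx : Int) : Option Int :=
  jaLoopA lines lines.length (start_idx + 1) 1

-- ===== PORT B =====
-- per-line net bracket deltas of the suffix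
def jaDeltas (xs : List String) : List Int :=
  xs.map (fun l => (PySem.Str.count l "[" : Int) - (PySem.Str.count l "]" : Int))

-- running-depth prefix sums starting from the given depth
def jaDepths : Int → List Int → List Int
  | _, [] => []
  | d, x :: xs => (d + x) :: jaDepths (d + x) xs

-- second pass: first position whose depth is zero, carrying the absolute index
def jaFindZero : List Int → Int → Option Int
  | [], _ => none
  | d :: ds, i => if d = 0 then some i else jaFindZero ds (i + 1)

def json_array_end_py_alt (lines : List String) (start_idx : Int) : Option Int :=
  let start := start_idx + 1
  jaFindZero (jaDepths 1 (jaDeltas (PySem.List.slice lines (some start) none))) start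

-- ===== PRECONDITION & SPEC =====
-- Pre_ excludes start_idx < -1, where A's scan begins at a negative Python index: it
-- raises IndexError when start_idx + 1 < -len(lines), and otherwise wraps around,
-- scanning the tail and then the whole list again — an artefact of Python negative
-- indexing; B scans the suffix once and can return None where A returns an index.
def Pre_json_array_end_py (lines : List String) (start_idx : Int) : Prop :=
  0 ≤ start_idx + 1
instance (lines : List String) (start_idx : Int) : Decidable (Pre_json_array_end_py lines start_idx) := by unfold Pre_json_array_end_py; infer_instance

def pvWitness_json_array_end_py : List String × Int := (["[\"a\",", "\"b\"]", "x"], 0)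

def Spec_json_array_end_py (lines : List String) (start_idx : Int) (out : Option Int) : Prop := out = json_array_end_py_alt lines start_idx
instance (lines : List String) (start_idx : Int) (out : Option Int) : Decidable (Spec_json_array_end_py lines start_idx out) := by unfold Spec_json_array_end_py; infer_instance

-- ===== CLAIM (what is proved, stated in full; the proofs are below) =====
def Claim_equal_json_array_end_py : Prop := ∀ (lines : List String) (start_idx : Int), Dom_json_array_end_py lines start_idx → Pre_json_array_end_py lines start_idx → Spec_json_array_end_py lines start_idx (json_array_end_py lines start_idx)

-- ===== LEMMAS AND PROOFS =====

lemma jaLoop_eq (lines : List String) :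
    ∀ (fuel : Nat) (e depth : Int), 0 ≤ e → lines.length ≤ fuel + e.toNat →
      jaLoopA lines fuel e depth
        = jaFindZero (jaDepths depth (jaDeltas (lines.drop e.toNat))) e := by
  intro fuel
  induction fuel with
  | zero =>
    intro e depth he hlen
    have : lines.drop e.toNat = [] := List.drop_eq_nil_of_le (by omega)
    simp [jaLoopA, this, jaDeltas, jaDepths, jaFindZero]
  | succ f ih =>
    intro e depth he hlen
    by_cases hlt : e < (lines.length : Int)
    · have hnat : e.toNat < lines.length := by omega
      have hdrop : lines.drop e.toNat = lines[e.toNat] :: lines.drop (e.toNat + 1) :=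
        List.drop_eq_getElem_cons hnat
      have hget : PySem.List.pyGet? lines e = some lines[e.toNat] :=
        PySem.List.pyGet?_eq_some_getElem lines he hlt
      have htn : (e + 1).toNat = e.toNat + 1 := by omega
      rw [jaLoopA, if_pos hlt, hget, hdrop]
      simp only [jaDeltas, List.map_cons, jaDepths, jaFindZero]
      have harith :
          depth + (PySem.Str.count lines[e.toNat] "[" : Int)
              - (PySem.Str.count lines[e.toNat] "]" : Int)
            = depth + ((PySem.Str.count lines[e.toNat] "[" : Int)
              - (PySem.Str.count lines[e.toNat] "]" : Int)) := by ring
      rw [harith]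
      by_cases hz :
          depth + ((PySem.Str.count lines[e.toNat] "[" : Int)
            - (PySem.Str.count lines[e.toNat] "]" : Int)) = 0
      · rw [if_pos hz, if_pos hz]
      · rw [if_neg hz, if_neg hz, ih (e + 1) _ (by omega) (by omega), htn]
        simp only [jaDeltas]
    · have : lines.drop e.toNat = [] := List.drop_eq_nil_of_le (by omega)
      rw [jaLoopA, if_neg hlt]
      simp [this, jaDeltas, jaDepths, jaFindZero]

-- ===== VERDICT (by name: the statement is the Claim_ definition above) =====
theorem json_array_end_py_spec : Claim_equal_json_array_end_py := by
  intro lines start_idx _ hpre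
  unfold Spec_json_array_end_py json_array_end_py json_array_end_py_alt
  show jaLoopA lines lines.length (start_idx + 1) 1
      = jaFindZero (jaDepths 1 (jaDeltas (PySem.List.slice lines (some (start_idx + 1)) none)))
          (start_idx + 1)
  have hpre' : (0 : Int) ≤ start_idx + 1 := hpre
  rw [PySem.List.slice_from lines hpre']
  exact jaLoop_eq lines lines.length (start_idx + 1) 1 hpre' (by omega)
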